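-- pv_equiv track=rewrite | github.com/Vynnsounet/AOC2024 | day_4/day_4.py | star_pattern
-- ===== SOURCE A (Python) =====
-- def star_pattern(length):
--     return [
--         [(0, i) for i in range(length)],
--         [(0, -i) for i in range(length)],
--         [(i, 0) for i in range(length)],
--         [(-i, 0) for i in range(length)],
--         [(i, i) for i in range(length)],
--         [(-i, i) for i in range(length)],
--         [(i, -i) for i in range(length)],
--         [(-i, -i) for i in range(length)],
--     ]
-- ===== SOURCE B (Python) =====
-- def star_pattern(length):
--     directions = [(0, 1), (0, -1), (1, 0), (-1, 0),
--                   (1, 1), (-1, 1), (1, -1), (-1, -1)]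
--     rays = []
--     for dr, dc in directions:
--         ray = []
--         x, y = 0, 0
--         for _ in range(length):
--             ray.append((x, y))
--             x += dr
--             y += dc
--         rays.append(ray)
--     return rays
-- ===== Notes on version B (the rewrite author's own statement) =====
-- stated objective: alternative
-- what changed: Replaced the eight separate closed-form comprehensions (dr*i, dc*i) with a single loop over a direction table that builds each ray by incremental accumulation of a running (x, y) position.
import Mathlib
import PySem

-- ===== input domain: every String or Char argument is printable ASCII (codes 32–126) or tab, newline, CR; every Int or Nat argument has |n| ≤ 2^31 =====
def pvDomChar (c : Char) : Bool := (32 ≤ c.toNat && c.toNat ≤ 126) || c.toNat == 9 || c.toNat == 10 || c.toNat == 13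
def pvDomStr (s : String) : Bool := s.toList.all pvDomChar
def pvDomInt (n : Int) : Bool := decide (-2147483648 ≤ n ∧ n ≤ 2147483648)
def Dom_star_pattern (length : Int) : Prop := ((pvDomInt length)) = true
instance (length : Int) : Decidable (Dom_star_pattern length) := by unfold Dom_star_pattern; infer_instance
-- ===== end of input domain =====

-- B rebuilds the eight rays from a direction table by incremental (x,y) stepping instead of eight closed-form comprehensions (alternative decomposition, same cost).


-- ===== PORT A =====
def star_pattern (length : Int) : List (List (Int × Int)) :=
  [ (PySem.List.pyRange 0 length 1).map (fun i => ((0 : Int), i)),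
    (PySem.List.pyRange 0 length 1).map (fun i => ((0 : Int), -i)),
    (PySem.List.pyRange 0 length 1).map (fun i => (i, (0 : Int))),
    (PySem.List.pyRange 0 length 1).map (fun i => (-i, (0 : Int))),
    (PySem.List.pyRange 0 length 1).map (fun i => (i, i)),
    (PySem.List.pyRange 0 length 1).map (fun i => (-i, i)),
    (PySem.List.pyRange 0 length 1).map (fun i => (i, -i)),
    (PySem.List.pyRange 0 length 1).map (fun i => (-i, -i)) ]

-- ===== PORT B =====
-- one ray: append the current position, then step by (dr, dc); repeats length-many times
def pvBuildRay (x y dr dc : Int) : Nat → List (Int × Int)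
  | 0 => []
  | n + 1 => (x, y) :: pvBuildRay (x + dr) (y + dc) dr dc n

def star_pattern_alt (length : Int) : List (List (Int × Int)) :=
  [((0:Int),(1:Int)), (0,-1), (1,0), (-1,0), (1,1), (-1,1), (1,-1), (-1,-1)].map
    (fun d => pvBuildRay 0 0 d.1 d.2 length.toNat)

-- ===== PRECONDITION & SPEC =====
def Spec_star_pattern (length : Int) (out : List (List (Int × Int))) : Prop := out = star_pattern_alt length
instance (length : Int) (out : List (List (Int × Int))) : Decidable (Spec_star_pattern length out) := by unfold Spec_star_pattern; infer_instance

-- ===== CLAIM (what is proved, stated in full; the proofs are below) =====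
def Claim_equal_star_pattern : Prop := ∀ (length : Int), Dom_star_pattern length → Spec_star_pattern length (star_pattern length)

-- ===== LEMMAS AND PROOFS =====

-- ===== VERDICT (by name: the statement is the Claim_ definition above) =====
lemma pvBuildRay_eq (dr dc : Int) (n : Nat) :
    ∀ x y : Int, pvBuildRay x y dr dc n = (List.range n).map (fun (k : Nat) => (x + dr * (k : Int), y + dc * (k : Int))) := by
  induction n with
  | zero => intro x y; simp [pvBuildRay]
  | succ n ih =>
    intro x y
    rw [List.range_succ_eq_map, List.map_cons, List.map_map, pvBuildRay, ih]
    refine List.cons_eq_cons.mpr ⟨by simp, List.map_congr_left fun k _ => ?_⟩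
    simp only [Function.comp_apply, Prod.mk.injEq]
    push_cast
    constructor <;> ring

lemma pvRay_closed (a b len : Int) (f : Int → Int × Int) (hf : ∀ i, f i = (a * i, b * i)) :
    (PySem.List.pyRange 0 len 1).map f = pvBuildRay 0 0 a b len.toNat := by
  rw [PySem.List.pyRange_one, pvBuildRay_eq, List.map_map, Int.sub_zero]
  refine List.map_congr_left fun k _ => ?_
  simp [hf]

theorem star_pattern_spec : Claim_equal_star_pattern := by
  intro length _
  unfold Spec_star_pattern star_pattern star_pattern_alt
  simp only [List.map_cons, List.map_nil]
  rw [pvRay_closed 0 1 _ _ (fun i => by simp),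
      pvRay_closed 0 (-1) _ _ (fun i => by simp),
      pvRay_closed 1 0 _ _ (fun i => by simp),
      pvRay_closed (-1) 0 _ _ (fun i => by simp),
      pvRay_closed 1 1 _ _ (fun i => by simp),
      pvRay_closed (-1) 1 _ _ (fun i => by simp),
      pvRay_closed 1 (-1) _ _ (fun i => by simp),
      pvRay_closed (-1) (-1) _ _ (fun i => by simp)]
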